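-- pv_equiv track=rewrite | github.com/maci0/rebrew | src/rebrew/merge.py | _merge_preambles
-- ===== SOURCE A (Python) =====
-- def _merge_preambles(preambles: list[str]) -> str:
--     """Merge preambles with exact-line dedup and collapsed blank lines."""
--     seen: set[str] = set()
--     merged_lines: list[str] = []
--
--     for preamble in preambles:
--         for line in preamble.splitlines():
--             if line.strip() == "":
--                 if merged_lines and merged_lines[-1] != "":
--                     merged_lines.append("")
--                 continue
--             if line in seen:
--                 continue
--             seen.add(line)
--             merged_lines.append(line)
--
--     while merged_lines and merged_lines[-1] == "":
--         merged_lines.pop()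
--
--     if not merged_lines:
--         return ""
--     return "\n".join(merged_lines) + "\n\n"
-- ===== SOURCE B (Python) =====
-- def _merge_preambles(preambles: list[str]) -> str:
--     """Merge preambles with exact-line dedup and collapsed blank lines.
--
--     Two-phase rewrite: first dedup non-blank lines while recording every blank
--     as '', then normalize blanks in a single right-to-left pass (a blank is
--     kept only when a kept line follows it), so no trailing-blank pop loop is
--     needed.
--     """
--     seen: set[str] = set()
--     inter: list[str] = []
--     for preamble in preambles:
--         for line in preamble.splitlines():
--             if line.strip() == "":
--                 inter.append("")
--             elif line not in seen:
--                 seen.add(line)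
--                 inter.append(line)
--
--     # Right-to-left: build the result reversed; a blank survives only if the
--     # line just appended (its successor in the output) is non-blank.
--     rev: list[str] = []
--     for line in reversed(inter):
--         if line != "":
--             rev.append(line)
--         elif rev and rev[-1] != "":
--             rev.append("")
--     if rev and rev[-1] == "":
--         rev.pop()  # at most one leading blank can remain
--     rev.reverse()
--
--     if not rev:
--         return ""
--     return "\n".join(rev) + "\n\n"
-- ===== Notes on version B (the rewrite author's own statement) =====
-- stated objective: alternative
-- what changed: A's single fused pass (dedup + conditional blank append + trailing-blank pop loop) is split into a dedup pass that records every blank line as '' and a separate right-to-left normalization pass in which a blank survives only when a kept line follows it, so trailing blanks never enter the result and at most one leading blank is removed.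
import Mathlib
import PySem

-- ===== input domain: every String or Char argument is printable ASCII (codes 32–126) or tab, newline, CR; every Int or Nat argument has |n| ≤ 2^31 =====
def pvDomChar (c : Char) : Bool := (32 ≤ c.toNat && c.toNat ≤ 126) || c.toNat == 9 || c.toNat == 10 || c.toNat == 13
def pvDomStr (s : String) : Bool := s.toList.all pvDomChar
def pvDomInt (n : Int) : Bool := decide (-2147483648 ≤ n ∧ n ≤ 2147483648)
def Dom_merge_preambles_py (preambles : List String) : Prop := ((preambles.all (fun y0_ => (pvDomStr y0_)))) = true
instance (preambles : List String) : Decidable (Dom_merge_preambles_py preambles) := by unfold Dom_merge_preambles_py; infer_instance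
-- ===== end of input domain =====

-- B replaces A's fused pass by a dedup pass that records every blank plus a right-to-left
-- blank-normalization pass (alternative decomposition, same asymptotic cost).

-- ===== PORT A =====
-- loop body of A's fused pass (blank collapse + dedup on the (seen, merged_lines) state)
def stepA (st : PySem.Set String × List String) (line : String) : PySem.Set String × List String :=
  if PySem.Str.strip line == "" then
    (if st.2 ≠ [] ∧ st.2.getLast? ≠ some "" then (st.1, st.2 ++ [""]) else st)
  else if PySem.Set.contains st.1 line then st
  else (PySem.Set.add st.1 line, st.2 ++ [line])

-- the 'while merged_lines and merged_lines[-1] == "": merged_lines.pop()' loop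
def pyDropTrail (m : List String) : List String :=
  if m.getLast? = some "" then pyDropTrail m.dropLast else m
termination_by m.length
decreasing_by
  have hne : m ≠ [] := by intro e; subst e; simp_all
  rw [List.length_dropLast]
  exact Nat.sub_lt (List.length_pos_iff.mpr hne) Nat.one_pos

def merge_preambles_py (preambles : List String) : String :=
  let st := preambles.foldl
    (fun st preamble => (PySem.Str.splitlines preamble).foldl stepA st)
    (PySem.Set.empty, [])
  let merged := pyDropTrail st.2
  if merged = [] then "" else PySem.Str.join "\n" merged ++ "\n\n"

-- ===== PORT B =====
-- phase 1 loop body: dedup non-blank lines, record every blank line as ""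
def stepB1 (st : PySem.Set String × List String) (line : String) : PySem.Set String × List String :=
  if PySem.Str.strip line == "" then (st.1, st.2 ++ [""])
  else if PySem.Set.contains st.1 line then st
  else (PySem.Set.add st.1 line, st.2 ++ [line])

-- phase 2 loop body: right-to-left blank normalization, building the result reversed
def stepB2 (rev : List String) (line : String) : List String :=
  if line ≠ "" then rev ++ [line]
  else if rev ≠ [] ∧ rev.getLast? ≠ some "" then rev ++ [""] else rev

def merge_preambles_py_alt (preambles : List String) : String :=
  let st := preambles.foldl
    (fun st preamble => (PySem.Str.splitlines preamble).foldl stepB1 st)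
    (PySem.Set.empty, [])
  let rev := st.2.reverse.foldl stepB2 []
  let rev := if rev.getLast? = some "" then rev.dropLast else rev
  let res := rev.reverse
  if res = [] then "" else PySem.Str.join "\n" res ++ "\n\n"

-- ===== PRECONDITION & SPEC =====
def Spec_merge_preambles_py (preambles : List String) (out : String) : Prop := out = merge_preambles_py_alt preambles
instance (preambles : List String) (out : String) : Decidable (Spec_merge_preambles_py preambles out) := by unfold Spec_merge_preambles_py; infer_instance

-- ===== CLAIM (what is proved, stated in full; the proofs are below) =====
def Claim_equal_merge_preambles_py : Prop := ∀ (preambles : List String), Dom_merge_preambles_py preambles → Spec_merge_preambles_py preambles (merge_preambles_py preambles)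

-- ===== LEMMAS AND PROOFS =====

-- the deduplicated intermediate line stream (blanks normalized to "") and its seen-set
def interF (s : PySem.Set String) : List String → List String
  | [] => []
  | l :: ls =>
    if PySem.Str.strip l == "" then "" :: interF s ls
    else if PySem.Set.contains s l then interF s ls
    else l :: interF (PySem.Set.add s l) ls

def seenF (s : PySem.Set String) : List String → PySem.Set String
  | [] => s
  | l :: ls =>
    if PySem.Str.strip l == "" then seenF s ls
    else if PySem.Set.contains s l then seenF s ls
    else seenF (PySem.Set.add s l) ls

-- A's blank/append step acting on the merged list alone
def Cstep (m : List String) (l : String) : List String :=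
  if l = "" then (if m ≠ [] ∧ m.getLast? ≠ some "" then m ++ [""] else m) else m ++ [l]

-- forward collapse with boolean state p = "merged is empty or ends in a blank"
def Cf : Bool → List String → List String
  | _, [] => []
  | p, l :: ls => if l = "" then (if p then Cf true ls else "" :: Cf true ls) else l :: Cf false ls

def pB (m : List String) : Bool := m.isEmpty || (m.getLast? == some "")

-- B's right-to-left collapse, as structural recursion on the suffix
def R : List String → List String
  | [] => []
  | l :: ls =>
    let r := R ls
    if l = "" then (if r ≠ [] ∧ r.head? ≠ some "" then "" :: r else r) else l :: r

-- strip trailing blanks, structurally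
def dT (m : List String) : List String := (m.reverse.dropWhile (fun s => s == "")).reverse

-- drop one leading blank
def dL (m : List String) : List String := if m.head? = some "" then m.tail else m

theorem pyDropTrail_eq_dT (m : List String) : pyDropTrail m = dT m := by
  have H : ∀ n (m : List String), m.length = n → pyDropTrail m = dT m := by
    intro n
    induction n using Nat.strong_induction_on with
    | _ n ih =>
      intro m hm
      by_cases h : m.getLast? = some ""
      · have hne : m ≠ [] := by intro e; subst e; simp_all
        rw [pyDropTrail, if_pos h,
          ih m.dropLast.length (by rw [List.length_dropLast, ← hm]
                                   exact Nat.sub_lt (List.length_pos_iff.mpr hne) Nat.one_pos)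
            m.dropLast rfl]
        obtain ⟨x, t, he⟩ : ∃ x t, m.reverse = x :: t := by
          cases hr : m.reverse with
          | nil => exact absurd (by simpa using hr) hne
          | cons x t => exact ⟨x, t, rfl⟩
        have hx : x = "" := by
          have h' := h
          rw [List.getLast?_eq_head?_reverse, he] at h'
          simpa using h'
        have hm2 : m = t.reverse ++ [""] := by
          rw [← List.reverse_reverse m, he, hx]
          simp
        have h1 : m.dropLast.reverse = t := by
          rw [hm2, List.dropLast_concat, List.reverse_reverse]
        unfold dT
        rw [h1, he, hx, List.dropWhile_cons_of_pos (by simp)]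
      · rw [pyDropTrail, if_neg h]
        unfold dT
        cases hr : m.reverse with
        | nil => simpa using congrArg List.reverse hr.symm
        | cons x t =>
          have hx : (x == "") = false := by
            rw [beq_eq_false_iff_ne]
            intro hxx
            apply h
            rw [List.getLast?_eq_head?_reverse, hr, hxx]
            rfl
          rw [List.dropWhile_cons_of_neg (by simp [hx]), ← hr, List.reverse_reverse]
  exact H m.length m rfl

theorem dT_cons (a : String) (x : List String) :
    dT (a :: x) = if a = "" then (if dT x = [] then [] else "" :: dT x) else a :: dT x := by
  unfold dT
  rw [List.reverse_cons, List.dropWhile_append]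
  by_cases hdw : (x.reverse.dropWhile (fun s => s == "")).isEmpty
  · rw [if_pos hdw]
    have hnil : x.reverse.dropWhile (fun s => s == "") = [] := by simpa [List.isEmpty_iff] using hdw
    rw [hnil]
    by_cases ha : a = ""
    · simp [List.dropWhile, ha]
    · have hbe : (a == "") = false := beq_eq_false_iff_ne.mpr ha
      simp [List.dropWhile, hbe, ha]
  · rw [if_neg hdw]
    have hne : x.reverse.dropWhile (fun s => s == "") ≠ [] := by simpa [List.isEmpty_iff] using hdw
    by_cases ha : a = "" <;> simp [ha, hne]

-- A's fused loop = phase-1 dedup stream, folded through the blank/append step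
theorem foldA_eq (ls : List String) : ∀ (s : PySem.Set String) (m : List String),
    ls.foldl stepA (s, m) = (seenF s ls, List.foldl Cstep m (interF s ls)) := by
  induction ls with
  | nil => intro s m; simp [seenF, interF]
  | cons l ls ih =>
    intro s m
    rw [List.foldl_cons]
    by_cases hb : (PySem.Str.strip l == "") = true
    · have h1 : stepA (s, m) l = (s, Cstep m "") := by
        by_cases hc : m ≠ [] ∧ m.getLast? ≠ some "" <;> simp [stepA, Cstep, hb, hc]
      rw [h1, ih,
        show interF s (l :: ls) = "" :: interF s ls from by simp [interF, hb],
        show seenF s (l :: ls) = seenF s ls from by simp [seenF, hb],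
        List.foldl_cons]
    · have hl : l ≠ "" := by intro e; subst e; exact hb (by decide)
      by_cases hs : PySem.Set.contains s l
      · have hs' : l ∈ s := by simpa using hs
        have h1 : stepA (s, m) l = (s, m) := by simp [stepA, hb, hs']
        rw [h1, ih,
          show interF s (l :: ls) = interF s ls from by simp [interF, hb, hs'],
          show seenF s (l :: ls) = seenF s ls from by simp [seenF, hb, hs']]
      · have hs' : l ∉ s := by simpa using hs
        have h1 : stepA (s, m) l = (PySem.Set.add s l, m ++ [l]) := by simp [stepA, hb, hs']
        rw [h1, ih,
          show interF s (l :: ls) = l :: interF (PySem.Set.add s l) ls from by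
            simp [interF, hb, hs'],
          show seenF s (l :: ls) = seenF (PySem.Set.add s l) ls from by simp [seenF, hb, hs'],
          List.foldl_cons,
          show Cstep m l = m ++ [l] from by simp [Cstep, hl]]

-- B's phase 1 appends exactly the dedup stream
theorem foldB_eq (ls : List String) : ∀ (s : PySem.Set String) (acc : List String),
    ls.foldl stepB1 (s, acc) = (seenF s ls, acc ++ interF s ls) := by
  induction ls with
  | nil => intro s acc; simp [seenF, interF]
  | cons l ls ih =>
    intro s acc
    rw [List.foldl_cons]
    by_cases hb : (PySem.Str.strip l == "") = true
    · have h1 : stepB1 (s, acc) l = (s, acc ++ [""]) := by simp [stepB1, hb]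
      rw [h1, ih,
        show interF s (l :: ls) = "" :: interF s ls from by simp [interF, hb],
        show seenF s (l :: ls) = seenF s ls from by simp [seenF, hb]]
      simp
    · by_cases hs : PySem.Set.contains s l
      · have hs' : l ∈ s := by simpa using hs
        have h1 : stepB1 (s, acc) l = (s, acc) := by simp [stepB1, hb, hs']
        rw [h1, ih,
          show interF s (l :: ls) = interF s ls from by simp [interF, hb, hs'],
          show seenF s (l :: ls) = seenF s ls from by simp [seenF, hb, hs']]
      · have hs' : l ∉ s := by simpa using hs
        have h1 : stepB1 (s, acc) l = (PySem.Set.add s l, acc ++ [l]) := by simp [stepB1, hb, hs']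
        rw [h1, ih,
          show interF s (l :: ls) = l :: interF (PySem.Set.add s l) ls from by
            simp [interF, hb, hs'],
          show seenF s (l :: ls) = seenF (PySem.Set.add s l) ls from by simp [seenF, hb, hs']]
        simp

theorem foldl_Cstep_eq_Cf (ls : List String) : ∀ (m : List String),
    List.foldl Cstep m ls = m ++ Cf (pB m) ls := by
  induction ls with
  | nil => intro m; simp [Cf]
  | cons l ls ih =>
    intro m
    rw [List.foldl_cons]
    by_cases hl : l = ""
    · subst hl
      by_cases hp : pB m
      · have hcond : ¬ (m ≠ [] ∧ m.getLast? ≠ some "") := by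
          simp only [pB, Bool.or_eq_true, List.isEmpty_iff, beq_iff_eq] at hp
          rcases hp with h | h <;> simp [h]
        rw [show Cstep m "" = m from by simp [Cstep, hcond], ih, hp,
          show Cf true ("" :: ls) = Cf true ls from by simp [Cf]]
      · have hcond : m ≠ [] ∧ m.getLast? ≠ some "" := by
          simp only [pB, Bool.or_eq_true, List.isEmpty_iff, beq_iff_eq] at hp
          push Not at hp
          exact hp
      
        rw [show Cstep m "" = m ++ [""] from by simp [Cstep, hcond], ih,
          show pB (m ++ [""]) = true from by simp [pB],
          show pB m = false from by simpa using hp,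
          show Cf false ("" :: ls) = "" :: Cf true ls from by simp [Cf]]
        simp
    · rw [show Cstep m l = m ++ [l] from by simp [Cstep, hl], ih,
        show pB (m ++ [l]) = false from by simp [pB, hl],
        show ∀ p, Cf p (l :: ls) = l :: Cf false ls from fun p => by simp [Cf, hl]]
      simp

-- B's phase 2 right-to-left fold computes (R inter).reverse
theorem foldr_rev_eq_R (ls : List String) :
    ls.foldr (fun line rev => stepB2 rev line) [] = (R ls).reverse := by
  induction ls with
  | nil => simp [R]
  | cons l ls ih =>
    rw [List.foldr_cons, ih]
    by_cases hl : l = ""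
    · subst hl
      rw [show R ("" :: ls) = if R ls ≠ [] ∧ (R ls).head? ≠ some "" then "" :: R ls else R ls
          from by simp [R],
        show stepB2 (R ls).reverse "" = if (R ls).reverse ≠ [] ∧ (R ls).reverse.getLast? ≠ some ""
            then (R ls).reverse ++ [""] else (R ls).reverse from by simp [stepB2]]
      by_cases hc : R ls ≠ [] ∧ (R ls).head? ≠ some ""
      · rw [if_pos hc,
          if_pos ⟨by simpa using hc.1, by rw [List.getLast?_reverse]; exact hc.2⟩]
        simp
      · rw [if_neg hc,
          if_neg (fun h => hc ⟨by simpa using h.1,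
            by rw [← List.getLast?_reverse]; exact h.2⟩)]
    · simp [stepB2, R, hl]

-- key normalization: trailing-strip of the forward collapse = leading-drop of the
-- right-to-left collapse
theorem main_norm (ls : List String) :
    dT (Cf true ls) = dL (R ls) ∧ dT (Cf false ls) = R ls ∧
      ((R ls).head? = some "" → (R ls).tail ≠ [] ∧ (R ls).tail.head? ≠ some "") := by
  induction ls with
  | nil => refine ⟨by simp [Cf, dT, dL, R], by simp [Cf, dT, R], by simp [R]⟩
  | cons l ls ih =>
    obtain ⟨ih1, ih2, ih3⟩ := ih
    by_cases hl : l = ""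
    · subst hl
      have hR : R ("" :: ls) = if R ls ≠ [] ∧ (R ls).head? ≠ some "" then "" :: R ls else R ls := by
        simp [R]
      refine ⟨?_, ?_, ?_⟩
      · rw [show Cf true ("" :: ls) = Cf true ls from by simp [Cf], ih1, hR]
        by_cases hc : R ls ≠ [] ∧ (R ls).head? ≠ some ""
        · rw [if_pos hc,
            show dL ("" :: R ls) = R ls from by
              unfold dL; rw [if_pos (by simp), List.tail_cons],
            show dL (R ls) = R ls from by unfold dL; rw [if_neg hc.2]]
        · rw [if_neg hc]
      · rw [show Cf false ("" :: ls) = "" :: Cf true ls from by simp [Cf], dT_cons, if_pos rfl,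
          ih1, hR]
        by_cases hc : R ls ≠ [] ∧ (R ls).head? ≠ some ""
        · rw [if_pos hc, show dL (R ls) = R ls from by unfold dL; rw [if_neg hc.2],
            if_neg hc.1]
        · rw [if_neg hc]
          push Not at hc
          by_cases hnil : R ls = []
          · rw [hnil]; simp [dL]
          · have hhd : (R ls).head? = some "" := hc hnil
            obtain ⟨ht, hth⟩ := ih3 hhd
            rw [show dL (R ls) = (R ls).tail from by unfold dL; rw [if_pos hhd], if_neg ht]
            cases hRls : R ls with
            | nil => exact absurd hRls hnil
            | cons x t =>
              have hx : x = "" := by rw [hRls] at hhd; simpa using hhd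
              simp [hx]
      · rw [hR]
        by_cases hc : R ls ≠ [] ∧ (R ls).head? ≠ some ""
        · rw [if_pos hc]; intro _; simpa using hc
        · rw [if_neg hc]; exact ih3
    · have hCf : ∀ p, Cf p (l :: ls) = l :: Cf false ls := by intro p; simp [Cf, hl]
      have hR : R (l :: ls) = l :: R ls := by simp [R, hl]
      have hdt : dT (l :: Cf false ls) = l :: dT (Cf false ls) := by
        rw [dT_cons, if_neg hl]
      refine ⟨?_, ?_, ?_⟩
      · rw [hCf, hdt, ih2, hR]
        unfold dL
        rw [if_neg (by simp [hl])]
      · rw [hCf, hdt, ih2, hR]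
      · rw [hR]; intro h; simp [hl] at h

-- ===== VERDICT (by name: the statement is the Claim_ definition above) =====
theorem merge_preambles_py_spec : Claim_equal_merge_preambles_py := by
  intro preambles _
  unfold Spec_merge_preambles_py merge_preambles_py merge_preambles_py_alt
  have flat : ∀ (f : (PySem.Set String × List String) → String → (PySem.Set String × List String))
      (init : PySem.Set String × List String),
      preambles.foldl (fun st p => (PySem.Str.splitlines p).foldl f st) init
        = (preambles.flatMap PySem.Str.splitlines).foldl f init := by
    intro f init
    rw [List.flatMap_def, List.foldl_flatten, List.foldl_map]
  rw [flat stepA, flat stepB1]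
  set lines := preambles.flatMap PySem.Str.splitlines with hlines
  rw [foldA_eq, foldB_eq]
  simp only [List.nil_append]
  set inter := interF PySem.Set.empty lines with hinter
  rw [foldl_Cstep_eq_Cf]
  simp only [List.nil_append, pB, List.isEmpty_nil, Bool.true_or]
  rw [pyDropTrail_eq_dT, (main_norm inter).1]
  rw [List.foldl_reverse, foldr_rev_eq_R]
  have hBres : (if (R inter).reverse.getLast? = some "" then (R inter).reverse.dropLast
      else (R inter).reverse).reverse = dL (R inter) := by
    rw [List.getLast?_reverse]
    unfold dL
    by_cases h : (R inter).head? = some ""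
    · rw [if_pos h, if_pos h, List.dropLast_reverse, List.reverse_reverse]
    · rw [if_neg h, if_neg h, List.reverse_reverse]
  rw [hBres]
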